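-- pv_equiv track=rewrite | github.com/vadim-zyamalov/advent-of-code | 2019/day-12/part1.py | coord_cycle
-- ===== SOURCE A (Python) =====
-- def coord(xs, vs):
--     N = len(xs)
--
--     dv = [0] * N
--
--     for i in range(N - 1):
--         for j in range(i + 1, N):
--             dx = xs[i] - xs[j]
--             dv[i] += 1 if dx < 0 else -1 if dx > 0 else 0
--             dv[j] += 1 if dx > 0 else -1 if dx < 0 else 0
--
--     for i in range(N):
--         vs[i] += dv[i]
--         xs[i] += vs[i]
--
-- def coord_cycle(xs):
--     cache = {}
--
--     i = 0
--     vs = [0] * len(xs)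
--     cache[tuple(xs + vs)] = 0
--
--     while True:
--         i += 1
--         coord(xs, vs)
--         if tuple(xs + vs) in cache:
--             return cache[tuple(xs + vs)], i
--         cache[tuple(xs + vs)] = i
-- ===== SOURCE B (Python) =====
-- def coord_cycle(xs):
--     # Functional re-implementation: each step rebuilds the velocity list by summing,
--     # for every body, the signs of its differences to all bodies (no mutating pairwise
--     # double loop), and the cycle is detected by comparing each new state against the
--     # remembered initial state only (the step map is invertible, so the first repeated
--     # state is necessarily the start).  B does not mutate its argument, while A does;
--     # the equivalence claimed is about the return value only.
--     def step(xs, vs):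
--         vs = [v + sum((y > x) - (y < x) for y in xs) for x, v in zip(xs, vs)]
--         xs = [x + v for x, v in zip(xs, vs)]
--         return xs, vs
--
--     start = (list(xs), [0] * len(xs))
--     cur = start
--     i = 0
--     while True:
--         i += 1
--         cur = step(cur[0], cur[1])
--         if cur == start:
--             return 0, i
-- ===== Notes on version B (the rewrite author's own statement) =====
-- stated objective: alternative
-- what changed: The pairwise mutating double loop that accumulates dv is replaced by a functional step that rebuilds each velocity as a sign-sum over all positions via zip/map, and the dict of all visited states is replaced by comparing each new state against the remembered initial state only (the step map is invertible, so the first repeat is the start).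
import Mathlib
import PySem

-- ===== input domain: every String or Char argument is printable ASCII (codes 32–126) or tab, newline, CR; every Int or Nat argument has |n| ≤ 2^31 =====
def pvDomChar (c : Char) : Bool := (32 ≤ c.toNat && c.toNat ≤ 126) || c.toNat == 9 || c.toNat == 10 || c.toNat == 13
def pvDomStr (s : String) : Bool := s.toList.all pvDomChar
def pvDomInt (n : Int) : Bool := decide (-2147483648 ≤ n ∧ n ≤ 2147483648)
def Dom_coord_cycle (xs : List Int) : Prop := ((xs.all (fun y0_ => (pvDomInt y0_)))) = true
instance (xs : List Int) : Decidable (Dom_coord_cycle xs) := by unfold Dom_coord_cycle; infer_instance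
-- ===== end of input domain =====

-- B rebuilds each velocity as a sign-sum over all positions (functional zip/map step instead
-- of A's mutating pairwise double loop) and detects the cycle by comparing each new state
-- against the remembered initial state only (the step map is invertible, so the first repeated
-- state is the start) instead of A's dict of all visited states (objective: alternative).
-- Python A mutates its argument list in place, B does not; the equivalence proved here is
-- about the return value only.


-- ===== PORT A =====

-- l[i] += d  (the index is always in range in A; pySetD/pyGetD merely totalise it)
def pvUpd (l : List Int) (i : Int) (d : Int) : List Int :=
  PySem.List.pySetD l i (PySem.List.pyGetD l i 0 + d)

-- the dv-building double loop of helper `coord` (it reads xs only)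
def pvDv (xs : List Int) : List Int :=
  (PySem.List.pyRange 0 (PySem.List.len xs - 1) 1).foldl (fun dv i =>
    (PySem.List.pyRange (i + 1) (PySem.List.len xs) 1).foldl (fun dv j =>
      let dx := PySem.List.pyGetD xs i 0 - PySem.List.pyGetD xs j 0
      let dv := pvUpd dv i (if dx < 0 then 1 else if dx > 0 then -1 else 0)
      pvUpd dv j (if dx > 0 then 1 else if dx < 0 then -1 else 0)) dv)
    (List.replicate xs.length 0)

-- body of the final loop of `coord`: vs[i] += dv[i]; xs[i] += vs[i]
def pvF (dv : List Int) (p : List Int × List Int) (i : Int) : List Int × List Int :=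
  let vs' := pvUpd p.2 i (PySem.List.pyGetD dv i 0)
  let xs' := pvUpd p.1 i (PySem.List.pyGetD vs' i 0)
  (xs', vs')

-- helper `coord` of A: mutates (xs, vs) in Python, ported as returning the new pair
def coord (xs vs : List Int) : List Int × List Int :=
  (PySem.List.pyRange 0 (PySem.List.len xs) 1).foldl (pvF (pvDv xs)) (xs, vs)

-- fuel only totalises the `while True:` loop; never exhausted on inputs the Python finishes on
def pvFuel : Nat := 2 ^ 100

def coord_cycle_loop (fuel : Nat) (xs vs : List Int) (cache : PySem.Dict (List Int) Int) (i : Int) :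
    Int × Int :=
  match fuel with
  | 0 => (0, 0)
  | f + 1 =>
    let i := i + 1
    let s := coord xs vs
    match cache.get? (s.1 ++ s.2) with
    | some k => (k, i)
    | none => coord_cycle_loop f s.1 s.2 (cache.insert (s.1 ++ s.2) i) i

def coord_cycle (xs : List Int) : Int × Int :=
  let vs : List Int := List.replicate xs.length 0
  let cache := (PySem.Dict.empty : PySem.Dict (List Int) Int).insert (xs ++ vs) 0
  coord_cycle_loop pvFuel xs vs cache 0

-- ===== PORT B =====

-- (y > x) - (y < x) of Source B
def sgnB (x y : Int) : Int := (if x < y then 1 else 0) - (if y < x then 1 else 0)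

-- the functional `step` of Source B: new velocities by a sign-sum over all positions, then new positions
def stepB (xs vs : List Int) : List Int × List Int :=
  let vs' := List.zipWith (fun x v => v + (xs.map (fun y => sgnB x y)).sum) xs vs
  let xs' := List.zipWith (fun x v => x + v) xs vs'
  (xs', vs')

def coord_cycle_alt_loop (fuel : Nat) (cur start : List Int × List Int) (i : Int) : Int × Int :=
  match fuel with
  | 0 => (0, 0)
  | f + 1 =>
    let i := i + 1
    let cur := stepB cur.1 cur.2
    if cur = start then (0, i) else coord_cycle_alt_loop f cur start i

def coord_cycle_alt (xs : List Int) : Int × Int :=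
  let start : List Int × List Int := (xs, List.replicate xs.length 0)
  coord_cycle_alt_loop pvFuel start start 0

-- ===== PRECONDITION & SPEC =====
def Spec_coord_cycle (xs : List Int) (out : Int × Int) : Prop := out = coord_cycle_alt xs
instance (xs : List Int) (out : Int × Int) : Decidable (Spec_coord_cycle xs out) := by
  unfold Spec_coord_cycle; infer_instance

-- ===== CLAIM (what is proved, stated in full; the proofs are below) =====
def Claim_equal_coord_cycle : Prop := ∀ (xs : List Int), Dom_coord_cycle xs → Spec_coord_cycle xs (coord_cycle xs)

-- ===== LEMMAS AND PROOFS =====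

theorem pvUpd_natCast (l : List Int) (k : Nat) (d : Int) (h : k < l.length) :
    pvUpd l (k : Int) d = l.set k (l[k] + d) := by
  simp [pvUpd, List.getD_eq_getElem?_getD, List.getElem?_eq_getElem h]

theorem pvUpd_length (l : List Int) (i d : Int) : (pvUpd l i d).length = l.length := by
  simp [pvUpd, PySem.List.length_pySetD]

theorem take_set_succ (xs : List Int) (k : Nat) (a : Int) (h : k < xs.length) :
    (xs.set k a).take (k+1) = xs.take k ++ [a] := by
  rw [List.set_eq_take_append_cons_drop, if_pos h, List.take_append]
  simp [List.length_take, Nat.le_of_lt h, List.take_take]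

theorem drop_set_succ (xs : List Int) (k : Nat) (a : Int) :
    (xs.set k a).drop (k+1) = xs.drop (k+1) := by
  rw [List.drop_set]; simp

-- the final loop of `coord`, characterised: it adds dv to vs and the new vs to xs, pointwise
theorem final_loop (n : Nat) (dv : List Int) (hd : dv.length = n) :
    ∀ (j : Nat) (k : Nat) (xs vs : List Int), k + j = n → xs.length = n → vs.length = n →
    (PySem.List.pyRange (k : Int) (n : Int) 1).foldl (pvF dv) (xs, vs) =
      (xs.take k ++ List.zipWith (· + ·) (xs.drop k) (List.zipWith (· + ·) (vs.drop k) (dv.drop k)),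
       vs.take k ++ List.zipWith (· + ·) (vs.drop k) (dv.drop k)) := by
  intro j
  induction j with
  | zero =>
    intro k xs vs hk hx hv
    have : k = n := by omega
    subst this
    rw [PySem.List.pyRange_one_eq_nil (by omega)]
    simp [List.take_of_length_le, List.drop_of_length_le, hx.le, hv.le]
  | succ j ih =>
    intro k xs vs hk hx hv
    have hkn : k < n := by omega
    have hkx : k < xs.length := by omega
    have hkv : k < vs.length := by omega
    have hkd : k < dv.length := by omega
    rw [PySem.List.pyRange_one_cons (by exact_mod_cast hkn)]
    rw [List.foldl_cons]
    have hstep : pvF dv (xs, vs) (k : Int) =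
        (xs.set k (xs[k] + (vs[k] + dv[k])), vs.set k (vs[k] + dv[k])) := by
      show pvF dv (xs, vs) (k : Int) = _
      simp only [pvF]
      rw [show PySem.List.pyGetD dv (k:Int) 0 = dv[k] by
            simp [List.getD_eq_getElem?_getD, List.getElem?_eq_getElem hkd]]
      rw [show pvUpd (xs, vs).2 (k:Int) dv[k] = vs.set k (vs[k] + dv[k]) from pvUpd_natCast vs k dv[k] hkv]
      rw [show PySem.List.pyGetD (vs.set k (vs[k] + dv[k])) (k:Int) 0 = vs[k] + dv[k] by
            simp [List.getD_eq_getElem?_getD, hkv]]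
      rw [show pvUpd (xs, vs).1 (k:Int) (vs[k] + dv[k]) = xs.set k (xs[k] + (vs[k] + dv[k])) from
            pvUpd_natCast xs k _ hkx]
    rw [hstep]
    have hcast : ((k : Int) + 1) = ((k + 1 : Nat) : Int) := by push_cast; ring
    rw [hcast, ih (k+1) _ _ (by omega) (by simpa using hx) (by simpa using hv)]
    rw [take_set_succ _ _ _ hkx, take_set_succ _ _ _ hkv, drop_set_succ, drop_set_succ,
        List.append_assoc, List.append_assoc, List.singleton_append, List.singleton_append]
    conv_rhs => rw [List.drop_eq_getElem_cons hkx, List.drop_eq_getElem_cons hkv,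
                    List.drop_eq_getElem_cons hkd, List.zipWith_cons_cons, List.zipWith_cons_cons]

theorem foldl_len (g : List Int → Int → List Int) (hg : ∀ dv j, (g dv j).length = dv.length) :
    ∀ (L : List Int) (dv : List Int), (L.foldl g dv).length = dv.length := by
  intro L
  induction L with
  | nil => intro dv; rfl
  | cons a L ih => intro dv; simp [List.foldl_cons, ih, hg]

theorem pvDv_length (xs : List Int) : (pvDv xs).length = xs.length := by
  unfold pvDv
  rw [foldl_len]
  · exact List.length_replicate ..
  · intro dv i
    rw [foldl_len]
    intro dv j
    simp [pvUpd_length]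

theorem coord_eq (xs vs : List Int) (h : vs.length = xs.length) :
    coord xs vs =
      (List.zipWith (· + ·) xs (List.zipWith (· + ·) vs (pvDv xs)),
       List.zipWith (· + ·) vs (pvDv xs)) := by
  unfold coord
  have := final_loop xs.length (pvDv xs) (pvDv_length xs) xs.length 0 xs vs (by omega) rfl h
  simp only [Nat.cast_zero] at this
  simp only [PySem.List.len_eq]
  rw [show ((0:Int)) = ((0:Nat):Int) by norm_num] at this ⊢
  rw [this]
  simp

theorem coord_fst_len (xs vs : List Int) (h : vs.length = xs.length) :
    (coord xs vs).1.length = xs.length ∧ (coord xs vs).2.length = xs.length := by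
  rw [coord_eq xs vs h]
  simp [h, pvDv_length]

-- `coord` is injective on pairs of lists of equal length: the step map is invertible
theorem coord_inj {x1 v1 x2 v2 : List Int} (h1 : v1.length = x1.length)
    (h2 : v2.length = x2.length) (hx : x1.length = x2.length)
    (h : coord x1 v1 = coord x2 v2) : x1 = x2 ∧ v1 = v2 := by
  rw [coord_eq x1 v1 h1, coord_eq x2 v2 h2, Prod.mk.injEq] at h
  obtain ⟨hfst, hsnd⟩ := h
  have hd1 := pvDv_length x1
  have hd2 := pvDv_length x2
  have hw1 : (List.zipWith (· + ·) v1 (pvDv x1)).length = x1.length := by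
    simp [h1, hd1]
  have hw2 : (List.zipWith (· + ·) v2 (pvDv x2)).length = x2.length := by
    simp [h2, hd2]
  have hxeq : x1 = x2 := by
    apply List.ext_getElem (by omega)
    intro i hi1 hi2
    have hme := congrArg (fun l => l[i]?) hfst
    dsimp only at hme
    rw [List.getElem?_eq_getElem (by simp; omega), List.getElem?_eq_getElem (by simp; omega)] at hme
    simp only [List.getElem_zipWith, Option.some.injEq] at hme
    have hv := congrArg (fun l => l[i]?) hsnd
    dsimp only at hv
    rw [List.getElem?_eq_getElem (by omega), List.getElem?_eq_getElem (by omega)] at hv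
    simp only [List.getElem_zipWith, Option.some.injEq] at hv
    omega
  refine ⟨hxeq, ?_⟩
  subst hxeq
  apply List.ext_getElem (by omega)
  intro i hi1 hi2
  have := congrArg (fun l => l[i]?) hsnd
  dsimp only at this
  rw [List.getElem?_eq_getElem (by omega), List.getElem?_eq_getElem (by omega)] at this
  simp only [List.getElem_zipWith, Option.some.injEq] at this
  omega

-- ---- pvDv equals B's sign-sum formula ----

-- one inner-loop body of A's double loop, with Nat indices
def innerB (xs : List Int) (i : Nat) (dv : List Int) (j : Nat) : List Int :=
  pvUpd (pvUpd dv (i : Int)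
      (if xs.getD i 0 - xs.getD j 0 < 0 then 1 else if xs.getD i 0 - xs.getD j 0 > 0 then -1 else 0))
    (j : Int)
    (if xs.getD i 0 - xs.getD j 0 > 0 then 1 else if xs.getD i 0 - xs.getD j 0 < 0 then -1 else 0)

theorem if_dx_first (a b : Int) :
    (if a - b < 0 then (1:Int) else if a - b > 0 then -1 else 0) = sgnB a b := by
  unfold sgnB; split_ifs <;> omega

theorem if_dx_second (a b : Int) :
    (if a - b > 0 then (1:Int) else if a - b < 0 then -1 else 0) = sgnB b a := by
  unfold sgnB; split_ifs <;> omega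

theorem sgnB_self (a : Int) : sgnB a a = 0 := by
  unfold sgnB; simp

theorem getD_pvUpd (l : List Int) (m : Nat) (d : Int) (hm : m < l.length) (k : Nat) :
    (pvUpd l (m : Int) d).getD k 0 = if k = m then l.getD k 0 + d else l.getD k 0 := by
  rw [pvUpd_natCast l m d hm]
  rcases eq_or_ne k m with rfl | hne
  · simp [List.getD_eq_getElem?_getD, hm]
  · simp [List.getD_eq_getElem?_getD, List.getElem?_set_ne (by omega : m ≠ k), hne]

theorem innerB_length (xs : List Int) (i : Nat) (dv : List Int) (j : Nat) :
    (innerB xs i dv j).length = dv.length := by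
  simp [innerB, pvUpd_length]

theorem getD_innerB (xs : List Int) (i j : Nat) (dv : List Int) (hdv : dv.length = xs.length)
    (hi : i < xs.length) (hj : j < xs.length) (_hij : i ≠ j) (k : Nat) :
    (innerB xs i dv j).getD k 0 = dv.getD k 0
      + (if k = i then sgnB (xs.getD i 0) (xs.getD j 0) else 0)
      + (if k = j then sgnB (xs.getD j 0) (xs.getD i 0) else 0) := by
  unfold innerB
  rw [if_dx_first, if_dx_second]
  rw [getD_pvUpd _ j _ (by rw [pvUpd_length]; omega) k, getD_pvUpd _ i _ (by omega) k]
  split_ifs <;> omega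

theorem foldl_innerB_getD (xs : List Int) (i : Nat) (hi : i < xs.length) :
    ∀ (J : List Nat), (∀ j ∈ J, j < xs.length) → i ∉ J → J.Nodup →
    ∀ (dv : List Int), dv.length = xs.length → ∀ (k : Nat),
    (J.foldl (innerB xs i) dv).getD k 0 = dv.getD k 0
      + (if k = i then (J.map (fun j => sgnB (xs.getD i 0) (xs.getD j 0))).sum else 0)
      + (if k ∈ J then sgnB (xs.getD k 0) (xs.getD i 0) else 0) := by
  intro J
  induction J with
  | nil => intro _ _ _ dv _ k; simp
  | cons j J ih =>
    intro hJ hiJ hnd dv hdv k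
    rw [List.foldl_cons]
    have hj : j < xs.length := hJ j (List.mem_cons_self ..)
    have hij : i ≠ j := fun h => hiJ (h ▸ List.mem_cons_self ..)
    have hjJ : j ∉ J := (List.nodup_cons.mp hnd).1
    rw [ih (fun a ha => hJ a (List.mem_cons_of_mem _ ha)) (fun h => hiJ (List.mem_cons_of_mem _ h))
        (List.nodup_cons.mp hnd).2 _ (by rw [innerB_length, hdv]) k]
    rw [getD_innerB xs i j dv hdv hi hj hij k]
    simp only [List.map_cons, List.sum_cons, List.mem_cons]
    by_cases hki : k = i
    · subst hki
      have hkJ : k ∉ J := fun h => hiJ (List.mem_cons_of_mem _ h)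
      simp [hkJ, fun h : k = j => hij h]
      ring
    · by_cases hkj : k = j
      · subst hkj
        simp [hki, hjJ]
      · by_cases hkJ : k ∈ J
        · simp [hki, hkj, hkJ]
        · simp [hki, hkj, hkJ]

-- the pairwise double loop of pvDv, re-indexed over Nat
theorem pvDv_eq_natfold (xs : List Int) :
    pvDv xs = (List.range (xs.length - 1)).foldl
      (fun dv i => (List.range (xs.length - 1 - i)).foldl (fun dv j => innerB xs i dv (i + 1 + j)) dv)
      (List.replicate xs.length 0) := by
  unfold pvDv
  rw [PySem.List.pyRange_one]
  rw [show ((PySem.List.len xs - 1) - 0).toNat = xs.length - 1 by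
        simp only [PySem.List.len_eq]; omega]
  rw [List.foldl_map]
  apply PySem.List.foldl_congr_mem
  intro dv i hi
  rw [PySem.List.pyRange_one]
  rw [show ((PySem.List.len xs - (0 + (i : Int) + 1)).toNat) = xs.length - 1 - i by
        simp only [PySem.List.len_eq]; omega]
  rw [List.foldl_map]
  apply PySem.List.foldl_congr_mem
  intro dv j hj
  unfold innerB
  simp only [zero_add]
  rw [show ((i:Int) + 1 + (j:Int)) = ((i + 1 + j : Nat) : Int) by push_cast; ring]
  simp only [PySem.List.pyGetD_natCast]

def pvT (xs : List Int) (k : Nat) : Int :=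
  ((List.range (xs.length - 1 - k)).map (fun j => sgnB (xs.getD k 0) (xs.getD (k + 1 + j) 0))).sum

theorem foldl_len_nat (g : List Int → Nat → List Int) (hg : ∀ dv j, (g dv j).length = dv.length) :
    ∀ (L : List Nat) (dv : List Int), (L.foldl g dv).length = dv.length := by
  intro L
  induction L with
  | nil => intro dv; rfl
  | cons a L ih => intro dv; rw [List.foldl_cons, ih, hg]

theorem outer_ptw (xs : List Int) :
    ∀ (m : Nat), m ≤ xs.length - 1 → ∀ (k : Nat), k < xs.length →
    (((List.range m).foldl
        (fun dv i => (List.range (xs.length - 1 - i)).foldl (fun dv j => innerB xs i dv (i + 1 + j)) dv)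
        (List.replicate xs.length 0)).getD k 0)
      = (if k < m then pvT xs k else 0)
        + ((List.range (min m k)).map (fun i => sgnB (xs.getD k 0) (xs.getD i 0))).sum := by
  intro m
  induction m with
  | zero =>
    intro _ k hk
    simp [List.getD_eq_getElem?_getD, hk]
  | succ m ih =>
    intro hm k hk
    rw [List.range_succ, List.foldl_append, List.foldl_cons, List.foldl_nil]
    rw [← List.foldl_map (f := fun j => m + 1 + j) (g := innerB xs m)]
    have hSlen : ((List.range m).foldl
        (fun dv i => (List.range (xs.length - 1 - i)).foldl (fun dv j => innerB xs i dv (i + 1 + j)) dv)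
        (List.replicate xs.length 0)).length = xs.length := by
      rw [foldl_len_nat]
      · exact List.length_replicate ..
      · intro dv i
        rw [foldl_len_nat]
        intro dv j
        exact innerB_length ..
    have hmN : m < xs.length := by omega
    rw [foldl_innerB_getD xs m hmN _
        (by intro j hj; obtain ⟨a, ha, rfl⟩ := List.mem_map.mp hj; have := List.mem_range.mp ha; omega)
        (by intro h; obtain ⟨a, ha, h⟩ := List.mem_map.mp h; omega)
        (List.Nodup.map (fun a b h => by omega) (List.nodup_range))
        _ hSlen k]
    rw [ih (by omega) k hk]
    rw [show (((List.range (xs.length - 1 - m)).map (fun j => m + 1 + j)).map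
          (fun j => sgnB (xs.getD m 0) (xs.getD j 0))).sum = pvT xs m by
        rw [List.map_map]; rfl]
    have hmemJ : (k ∈ (List.range (xs.length - 1 - m)).map (fun j => m + 1 + j)) ↔ (m < k) := by
      constructor
      · intro h; obtain ⟨a, _, h⟩ := List.mem_map.mp h; omega
      · intro h
        exact List.mem_map.mpr ⟨k - m - 1, List.mem_range.mpr (by omega), by omega⟩
    simp only [hmemJ]
    rcases Nat.lt_trichotomy k m with hkm | hkm | hkm
    · rw [if_pos hkm, if_pos (show k < m + 1 by omega), if_neg (show ¬k = m by omega),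
          if_neg (show ¬m < k by omega), min_eq_right (Nat.le_of_lt hkm),
          min_eq_right (show k ≤ m + 1 by omega)]
      ring
    · subst hkm
      rw [if_neg (show ¬k < k by omega), if_pos (show k < k + 1 by omega), if_pos rfl,
          if_neg (show ¬k < k by omega), min_self, min_eq_right (show k ≤ k + 1 by omega)]
      ring
    · rw [if_neg (show ¬k < m by omega), if_neg (show ¬k < m + 1 by omega),
          if_neg (show ¬k = m by omega), if_pos hkm, min_eq_left (Nat.le_of_lt hkm),
          min_eq_left (show m + 1 ≤ k by omega)]
      rw [List.range_succ, List.map_append, List.sum_append]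
      simp only [List.map_cons, List.map_nil, List.sum_cons, List.sum_nil]
      ring

theorem take_eq_map_range (xs : List Int) (k : Nat) (hk : k ≤ xs.length) :
    xs.take k = (List.range k).map (fun i => xs.getD i 0) := by
  apply List.ext_getElem (by simp; omega)
  intro i hi1 hi2
  have hi : i < xs.length := by simp at hi1; omega
  simp [List.getD_eq_getElem?_getD, List.getElem?_eq_getElem hi]

theorem drop_eq_map_range (xs : List Int) (k : Nat) :
    xs.drop k = (List.range (xs.length - k)).map (fun j => xs.getD (k + j) 0) := by
  apply List.ext_getElem (by simp)
  intro i hi1 hi2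
  have hi : k + i < xs.length := by simp at hi1; omega
  simp [List.getD_eq_getElem?_getD, List.getElem?_eq_getElem hi]

theorem map_sum_split (f : Int → Int) (xs : List Int) (k : Nat) (hk : k < xs.length) :
    (xs.map f).sum = ((List.range k).map (fun i => f (xs.getD i 0))).sum + f (xs.getD k 0)
      + ((List.range (xs.length - 1 - k)).map (fun j => f (xs.getD (k + 1 + j) 0))).sum := by
  conv_lhs => rw [← List.take_append_drop k xs, ← List.getElem_cons_drop hk]
  rw [List.map_append, List.sum_append, List.map_cons, List.sum_cons]
  rw [take_eq_map_range xs k (Nat.le_of_lt hk), drop_eq_map_range xs (k + 1)]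
  rw [show xs.length - (k + 1) = xs.length - 1 - k by omega]
  rw [show xs[k] = xs.getD k 0 by
        simp [List.getD_eq_getElem?_getD, List.getElem?_eq_getElem hk]]
  rw [List.map_map, List.map_map]
  simp only [Function.comp_def]
  ring

theorem pvDv_eq_map (xs : List Int) :
    pvDv xs = xs.map (fun x => (xs.map (fun y => sgnB x y)).sum) := by
  rw [pvDv_eq_natfold]
  have hlen : ((List.range (xs.length - 1)).foldl
      (fun dv i => (List.range (xs.length - 1 - i)).foldl (fun dv j => innerB xs i dv (i + 1 + j)) dv)
      (List.replicate xs.length 0)).length = xs.length := by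
    rw [foldl_len_nat]
    · exact List.length_replicate ..
    · intro dv i
      rw [foldl_len_nat]
      intro dv j
      exact innerB_length ..
  apply List.ext_getElem (by rw [hlen]; simp)
  intro k hk1 hk2
  have hk : k < xs.length := by rwa [hlen] at hk1
  have hgetD := outer_ptw xs (xs.length - 1) (le_refl _) k hk
  rw [show (((List.range (xs.length - 1)).foldl
      (fun dv i => (List.range (xs.length - 1 - i)).foldl (fun dv j => innerB xs i dv (i + 1 + j)) dv)
      (List.replicate xs.length 0)))[k] = (((List.range (xs.length - 1)).foldl
      (fun dv i => (List.range (xs.length - 1 - i)).foldl (fun dv j => innerB xs i dv (i + 1 + j)) dv)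
      (List.replicate xs.length 0))).getD k 0 by
        simp [List.getD_eq_getElem?_getD, List.getElem?_eq_getElem hk1]]
  rw [hgetD]
  rw [List.getElem_map]
  rw [show xs[k] = xs.getD k 0 by
        simp [List.getD_eq_getElem?_getD, List.getElem?_eq_getElem hk]]
  rw [map_sum_split (fun y => sgnB (xs.getD k 0) y) xs k hk]
  rw [min_eq_right (show k ≤ xs.length - 1 by omega)]
  rw [sgnB_self]
  have hfirst : (if k < xs.length - 1 then pvT xs k else 0) = pvT xs k := by
    by_cases h : k < xs.length - 1
    · rw [if_pos h]
    · rw [if_neg h]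
      unfold pvT
      rw [show xs.length - 1 - k = 0 by omega]
      simp
  rw [hfirst]
  unfold pvT
  ring

theorem zipWith_add_comm_map (f : Int → Int) :
    ∀ (xs vs : List Int), List.zipWith (fun x v => v + f x) xs vs = List.zipWith (· + ·) vs (xs.map f) := by
  intro xs
  induction xs with
  | nil => intro vs; simp
  | cons x xs ih =>
    intro vs
    cases vs with
    | nil => simp
    | cons v vs => simp [ih]

theorem stepB_eq_coord (xs vs : List Int) (h : vs.length = xs.length) :
    stepB xs vs = coord xs vs := by
  rw [coord_eq xs vs h]
  show (_, _) = _
  rw [pvDv_eq_map]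
  have hv : List.zipWith (fun x v => v + (xs.map (fun y => sgnB x y)).sum) xs vs
      = List.zipWith (· + ·) vs (xs.map (fun x => (xs.map (fun y => sgnB x y)).sum)) :=
    zipWith_add_comm_map _ xs vs
  simp only [hv]

-- ---- the two cycle-detection loops agree ----

-- the trajectory of states (xs, vs) of the simulation started from xs0
def pvSt (xs0 : List Int) : Nat → List Int × List Int
  | 0 => (xs0, List.replicate xs0.length 0)
  | k + 1 => coord (pvSt xs0 k).1 (pvSt xs0 k).2

-- the cache key tuple(xs + vs)
def pvKey (s : List Int × List Int) : List Int := s.1 ++ s.2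

theorem pvSt_length (xs0 : List Int) :
    ∀ k, (pvSt xs0 k).1.length = xs0.length ∧ (pvSt xs0 k).2.length = xs0.length := by
  intro k
  induction k with
  | zero => simp [pvSt]
  | succ k ih =>
    have := coord_fst_len (pvSt xs0 k).1 (pvSt xs0 k).2 (by omega)
    simp only [pvSt]
    omega

theorem pvKey_inj (xs0 : List Int) {a b : Nat}
    (h : pvKey (pvSt xs0 a) = pvKey (pvSt xs0 b)) : pvSt xs0 a = pvSt xs0 b := by
  have ha := pvSt_length xs0 a
  have hb := pvSt_length xs0 b
  have := List.append_inj h (by omega)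
  exact Prod.ext this.1 this.2

theorem pvSt_back (xs0 : List Int) {a b : Nat}
    (h : pvSt xs0 (a + 1) = pvSt xs0 (b + 1)) : pvSt xs0 a = pvSt xs0 b := by
  have ha := pvSt_length xs0 a
  have hb := pvSt_length xs0 b
  have : coord (pvSt xs0 a).1 (pvSt xs0 a).2 = coord (pvSt xs0 b).1 (pvSt xs0 b).2 := h
  have := coord_inj (by omega) (by omega) (by omega) this
  exact Prod.ext this.1 this.2

-- as long as all states so far are distinct, a cache hit in A can only be the start state
-- (running `coord` backwards from an equal later pair would contradict distinctness), which
-- is exactly what B's comparison against the start detects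
theorem loops_eq (xs0 : List Int) :
    ∀ (f : Nat) (m : Nat),
      (((List.range (m + 1)).map (fun k => pvKey (pvSt xs0 k))).Nodup) →
      coord_cycle_loop f (pvSt xs0 m).1 (pvSt xs0 m).2
        (PySem.Dict.mk ((List.range (m + 1)).map (fun k => (pvKey (pvSt xs0 k), (k : Int))))) (m : Int)
      = coord_cycle_alt_loop f (pvSt xs0 m) (pvSt xs0 0) (m : Int) := by
  intro f
  induction f with
  | zero => intro m _; rfl
  | succ f ih =>
    intro m hnd
    simp only [coord_cycle_loop, coord_cycle_alt_loop]
    have hs : coord (pvSt xs0 m).1 (pvSt xs0 m).2 = pvSt xs0 (m + 1) := rfl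
    have hsB : stepB (pvSt xs0 m).1 (pvSt xs0 m).2 = pvSt xs0 (m + 1) := by
      rw [stepB_eq_coord _ _ (by have := pvSt_length xs0 m; omega)]
      exact hs
    rw [hs, hsB]
    have hkeys : (PySem.Dict.mk ((List.range (m + 1)).map
        (fun k => (pvKey (pvSt xs0 k), (k : Int))))).keys
        = (List.range (m + 1)).map (fun k => pvKey (pvSt xs0 k)) := by
      simp [PySem.Dict.keys]
    have hkey : (pvSt xs0 (m+1)).1 ++ (pvSt xs0 (m+1)).2 = pvKey (pvSt xs0 (m+1)) := rfl
    rw [hkey]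
    by_cases hmem : pvKey (pvSt xs0 (m + 1)) ∈ (List.range (m + 1)).map (fun k => pvKey (pvSt xs0 k))
    · -- the new state was seen before: it must be the initial state
      obtain ⟨k, hk, hkeq⟩ := List.mem_map.mp hmem
      have hkrange : k < m + 1 := List.mem_range.mp hk
      have hk0 : k = 0 := by
        rcases k with _ | k'
        · rfl
        · exfalso
          have hst : pvSt xs0 (m + 1) = pvSt xs0 (k' + 1) := pvKey_inj xs0 hkeq.symm
          have hback : pvSt xs0 m = pvSt xs0 k' := pvSt_back xs0 hst
          have : m = k' := by
            apply List.inj_on_of_nodup_map hnd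
            · exact List.mem_range.mpr (by omega)
            · exact List.mem_range.mpr (by omega)
            · rw [hback]
          omega
      subst hk0
      have hst0 : pvSt xs0 (m + 1) = pvSt xs0 0 := pvKey_inj xs0 hkeq.symm
      rw [if_pos hst0]
      have hget : (PySem.Dict.mk ((List.range (m + 1)).map
          (fun k => (pvKey (pvSt xs0 k), (k : Int))))).get? (pvKey (pvSt xs0 0)) = some 0 := by
        apply PySem.Dict.get?_of_mem_items
        · exact List.mem_map.mpr ⟨0, List.mem_range.mpr (by omega), by norm_num⟩
        · rw [hkeys]; exact hnd
      rw [show pvKey (pvSt xs0 (m+1)) = pvKey (pvSt xs0 0) from hkeq.symm, hget]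
    · -- fresh state: both loops continue
      have hget : (PySem.Dict.mk ((List.range (m + 1)).map
          (fun k => (pvKey (pvSt xs0 k), (k : Int))))).get? (pvKey (pvSt xs0 (m + 1))) = none := by
        rw [PySem.Dict.get?_eq_none_iff_not_mem_keys, hkeys]
        exact hmem
      rw [hget]
      have hne : pvSt xs0 (m + 1) ≠ pvSt xs0 0 := by
        intro h
        exact hmem (by rw [h]; exact List.mem_map.mpr ⟨0, List.mem_range.mpr (by omega), rfl⟩)
      rw [if_neg hne]
      have hcontains : (PySem.Dict.mk ((List.range (m + 1)).map
          (fun k => (pvKey (pvSt xs0 k), (k : Int))))).contains (pvKey (pvSt xs0 (m + 1))) = false := by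
        rw [PySem.Dict.contains_eq_decide_mem_keys, hkeys]
        simpa using hmem
      have hins : (PySem.Dict.mk ((List.range (m + 1)).map
            (fun k => (pvKey (pvSt xs0 k), (k : Int))))).insert (pvKey (pvSt xs0 (m + 1))) ((m : Int) + 1)
          = PySem.Dict.mk ((List.range (m + 1 + 1)).map (fun k => (pvKey (pvSt xs0 k), (k : Int)))) := by
        apply PySem.Dict.ext
        rw [PySem.Dict.items_insert_of_not_contains _ _ hcontains]
        rw [List.range_succ (n := m + 1), List.map_append]
        rfl
      rw [hins]
      have hnd' : ((List.range (m + 1 + 1)).map (fun k => pvKey (pvSt xs0 k))).Nodup := by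
        rw [List.range_succ (n := m + 1), List.map_append]
        simp only [List.map_cons, List.map_nil]
        rw [List.nodup_append]
        exact ⟨hnd, List.nodup_singleton _, by simpa [List.disjoint_singleton] using hmem⟩
      have := ih (m + 1) hnd'
      push_cast at this ⊢
      exact this

theorem coord_cycle_eq_alt (xs : List Int) : coord_cycle xs = coord_cycle_alt xs := by
  show coord_cycle_loop pvFuel xs (List.replicate xs.length 0)
      ((PySem.Dict.empty : PySem.Dict (List Int) Int).insert (xs ++ List.replicate xs.length 0) 0) 0
    = coord_cycle_alt_loop pvFuel (xs, List.replicate xs.length 0) (xs, List.replicate xs.length 0) 0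
  have h0 : (PySem.Dict.empty : PySem.Dict (List Int) Int).insert (xs ++ List.replicate xs.length 0) 0
      = PySem.Dict.mk ((List.range 1).map (fun k => (pvKey (pvSt xs k), (k : Int)))) := by
    apply PySem.Dict.ext
    rw [PySem.Dict.items_insert_of_not_contains _ _ (by simp)]
    simp [pvSt, pvKey, PySem.Dict.empty]
  rw [h0]
  have := loops_eq xs pvFuel 0 (by simp)
  simpa [pvSt, pvKey] using this

-- ===== VERDICT (by name: the statement is the Claim_ definition above) =====
theorem coord_cycle_spec : Claim_equal_coord_cycle := by
  intro xs _
  unfold Spec_coord_cycle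
  exact coord_cycle_eq_alt xs
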